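-- pv_equiv track=rewrite | github.com/alok1994/pythonExample | dellP.py | subSequenceList
-- ===== SOURCE A (Python) =====
-- def subSequenceList(arr):
--     curr = [arr[0]]
--     res = []
--     for i in arr[1:]:
--         if i - 1 != curr[-1]:
--              res.append(curr)
--              curr = [i]
--         else:
--             curr.append(i)
--     res.append(curr)
--     return res
-- ===== SOURCE B (Python) =====
-- def subSequenceList(arr):
--     # Build the groups back-to-front: walk the array from the right, appending
--     # each element to the group it chains into (kept in reversed form so every
--     # operation is an O(1) append), then reverse both levels at the end.
--     rgroups = []  # groups back-to-front, each group built right-to-left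
--     for x in reversed(arr):
--         if rgroups and rgroups[-1][-1] == x + 1:
--             rgroups[-1].append(x)
--         else:
--             rgroups.append([x])
--     return [g[::-1] for g in reversed(rgroups)]
-- ===== Notes on version B (the rewrite author's own statement) =====
-- stated objective: alternative
-- what changed: B builds the result back-to-front in one right-to-left pass, appending each element to the group it chains into and reversing both levels at the end, instead of A's left-to-right accumulation of a current run flushed into the result.
import Mathlib
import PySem

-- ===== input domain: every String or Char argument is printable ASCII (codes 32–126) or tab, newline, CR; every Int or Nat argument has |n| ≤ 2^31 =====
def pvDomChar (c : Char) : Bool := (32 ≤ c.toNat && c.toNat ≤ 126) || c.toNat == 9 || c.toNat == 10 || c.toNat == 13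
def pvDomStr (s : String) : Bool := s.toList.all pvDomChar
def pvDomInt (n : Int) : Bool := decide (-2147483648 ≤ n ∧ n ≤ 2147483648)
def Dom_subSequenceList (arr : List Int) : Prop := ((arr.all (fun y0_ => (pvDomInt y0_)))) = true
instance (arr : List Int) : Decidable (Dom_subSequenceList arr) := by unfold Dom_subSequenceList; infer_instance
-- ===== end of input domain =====

-- B builds the groups back-to-front in one right-to-left pass (alternative
-- decomposition, same cost); return values agree on every nonempty list.

-- ===== PORT A =====
-- one loop step of A: 'if i - 1 != curr[-1]: res.append(curr); curr = [i] else: curr.append(i)'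
def aStep (st : List Int × List (List Int)) (i : Int) : List Int × List (List Int) :=
  if i - 1 ≠ st.1.getLast! then ([i], st.2 ++ [st.1]) else (st.1 ++ [i], st.2)

def subSequenceList (arr : List Int) : List (List Int) :=
  match arr with
  | [] => []  -- Python raises IndexError here (arr[0]); excluded by Pre_
  | a :: rest =>  -- curr = [arr[0]]; res = []; for i in arr[1:] (= rest): …
      let st := rest.foldl aStep ([a], ([] : List (List Int)))
      st.2 ++ [st.1]  -- res.append(curr); return res

-- ===== PORT B =====
-- one loop step of B: 'if rgroups and rgroups[-1][-1] == x + 1: rgroups[-1].append(x) else: rgroups.append([x])'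
def bStep (rg : List (List Int)) (x : Int) : List (List Int) :=
  if rg ≠ [] ∧ rg.getLast!.getLast! = x + 1 then rg.dropLast ++ [rg.getLast! ++ [x]]
  else rg ++ [[x]]

def subSequenceList_alt (arr : List Int) : List (List Int) :=
  -- rgroups = []; for x in reversed(arr): …; return [g[::-1] for g in reversed(rgroups)]
  ((arr.reverse.foldl bStep []).reverse).map List.reverse

-- ===== PRECONDITION & SPEC =====
-- Pre_ excludes exactly the empty list, on which Python A raises IndexError (arr[0]).
def Pre_subSequenceList (arr : List Int) : Prop := arr ≠ []
instance (arr : List Int) : Decidable (Pre_subSequenceList arr) := by unfold Pre_subSequenceList; infer_instance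
def pvWitness_subSequenceList : List Int := [1, 2, 5]

def Spec_subSequenceList (arr : List Int) (out : List (List Int)) : Prop := out = subSequenceList_alt arr
instance (arr : List Int) (out : List (List Int)) : Decidable (Spec_subSequenceList arr out) := by unfold Spec_subSequenceList; infer_instance

-- ===== CLAIM (what is proved, stated in full; the proofs are below) =====
def Claim_equal_subSequenceList : Prop := ∀ (arr : List Int), Dom_subSequenceList arr → Pre_subSequenceList arr → Spec_subSequenceList arr (subSequenceList arr)

-- ===== LEMMAS AND PROOFS =====

lemma getLast!_append_right {α : Type} [Inhabited α] (p c : List α) (h : c ≠ []) :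
    (p ++ c).getLast! = c.getLast! := by
  rw [List.getLast!_eq_getLast?_getD, List.getLast!_eq_getLast?_getD, List.getLast?_append_of_ne_nil p h]

-- A's fold only appends to res: the accumulated res factors out as a prefix
lemma lemA (l : List Int) (curr : List Int) (res : List (List Int)) :
    l.foldl aStep (curr, res) = ((l.foldl aStep (curr, [])).1, res ++ (l.foldl aStep (curr, [])).2) := by
  induction l generalizing curr res with
  | nil => simp
  | cons i l ih =>
    simp only [List.foldl_cons, aStep, List.nil_append]
    by_cases h : i - 1 ≠ curr.getLast!
    · simp only [if_pos h]
      rw [ih [i] (res ++ [curr]), ih [i] [curr]]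
      simp
    · simp only [if_neg h]
      exact ih _ res

-- a prefix glued onto curr ends up glued onto the first emitted group (or onto the final curr)
lemma lemL (l : List Int) (p c : List Int) (h : c ≠ []) :
    l.foldl aStep (p ++ c, []) =
      (match l.foldl aStep (c, []) with
       | (c', []) => (p ++ c', ([] : List (List Int)))
       | (c', g :: gs) => (c', (p ++ g) :: gs)) := by
  induction l generalizing p c with
  | nil => simp
  | cons i l ih =>
    simp only [List.foldl_cons, aStep, getLast!_append_right p c h, List.nil_append]
    by_cases hs : i - 1 ≠ c.getLast!
    · simp only [if_pos hs]
      rw [lemA l [i] [p ++ c], lemA l [i] [c]]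
      rcases hfold : (l.foldl aStep ([i], [])) with ⟨c0, r0⟩
      simp
    · simp only [if_neg hs]
      rw [List.append_assoc]
      exact ih p (c ++ [i]) (by simp)

-- the first group A produces starts with the first array element
lemma lemH (l : List Int) (x : Int) (t : List Int) :
    ∃ u, ((l.foldl aStep (x :: t, [])).2).headD ((l.foldl aStep (x :: t, [])).1) = x :: u := by
  induction l generalizing x t with
  | nil => exact ⟨t, rfl⟩
  | cons i l ih =>
    simp only [List.foldl_cons, aStep, List.nil_append]
    by_cases hs : i - 1 ≠ (x :: t).getLast!
    · simp only [if_pos hs]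
      rw [lemA l [i] [x :: t]]
      exact ⟨t, rfl⟩
    · simp only [if_neg hs, List.cons_append]
      exact ih x (t ++ [i])

-- the recursive step B's right-to-left pass amounts to when read front-to-back
def altStep (x : Int) (groups : List (List Int)) : List (List Int) :=
  match groups with
  | (y :: g) :: gs => if y = x + 1 then (x :: y :: g) :: gs else [x] :: (y :: g) :: gs
  | _ => [x] :: groups

def G (l : List Int) : List (List Int) := l.foldr (fun x rg => bStep rg x) []

lemma alt_eq_G (l : List Int) : subSequenceList_alt l = (G l).reverse.map List.reverse := by
  simp [subSequenceList_alt, G, List.foldl_reverse]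

lemma G_groups_ne_nil (l : List Int) : ∀ g ∈ G l, g ≠ [] := by
  induction l with
  | nil => simp [G]
  | cons x l ih =>
    have hG : G (x :: l) = bStep (G l) x := rfl
    rw [hG, bStep]
    split_ifs with hc
    · intro g hg
      rcases List.mem_append.1 hg with hd | hlast
      · exact ih g (List.dropLast_subset _ hd)
      · simp at hlast; subst hlast; simp
    · intro g hg
      rcases List.mem_append.1 hg with hd | hlast
      · exact ih g hd
      · simp at hlast; subst hlast; simp

lemma alt_cons (x : Int) (l : List Int) :
    subSequenceList_alt (x :: l) = altStep x (subSequenceList_alt l) := by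
  rw [alt_eq_G, alt_eq_G]
  have hG : G (x :: l) = bStep (G l) x := rfl
  rw [hG]
  rcases List.eq_nil_or_concat (G l) with h0 | ⟨gs, g, hgl⟩
  · rw [h0]; simp [bStep, altStep]
  · have hg : g ≠ [] := G_groups_ne_nil l g (by rw [hgl]; simp)
    rcases List.eq_nil_or_concat g with h1 | ⟨h, z, hgz⟩
    · exact absurd h1 hg
    simp only [List.concat_eq_append] at hgl hgz
    rw [hgl, hgz, bStep]
    have hlast : (gs ++ [h ++ [z]]).getLast! = h ++ [z] := by
      rw [getLast!_append_right gs [h ++ [z]] (by simp)]; simp [List.getLast!]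
    have hlast2 : (h ++ [z]).getLast! = z := by
      rw [getLast!_append_right h [z] (by simp)]; simp [List.getLast!]
    by_cases hz : z = x + 1
    · rw [if_pos ⟨by simp, by rw [hlast, hlast2]; exact hz⟩]
      simp [altStep, hz]
    · rw [if_neg (by rw [hlast, hlast2]; tauto)]
      simp [altStep, hz]

lemma main_eq (l : List Int) (a : Int) :
    subSequenceList (a :: l) = subSequenceList_alt (a :: l) := by
  induction l generalizing a with
  | nil => rw [alt_cons]; simp [subSequenceList, subSequenceList_alt, altStep]
  | cons b l' ih =>
    rw [alt_cons, ← ih b]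
    simp only [subSequenceList]
    obtain ⟨u, hu⟩ := lemH l' b []
    rcases hfold : l'.foldl aStep ([b], []) with ⟨c0, r0⟩
    rw [hfold] at hu
    by_cases hab : b - 1 = a
    · have h1 : (b :: l').foldl aStep ([a], []) = l'.foldl aStep ([a] ++ [b], []) := by
        simp [aStep, hab, List.getLast!]
      rw [h1, lemL l' [a] [b] (by simp), hfold]
      cases r0 with
      | nil =>
        simp only [List.headD] at hu
        simp [altStep, hu, show b = a + 1 by omega]
      | cons g gs =>
        simp only [List.headD] at hu
        simp [altStep, hu, show b = a + 1 by omega]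
    · have h1 : (b :: l').foldl aStep ([a], []) = l'.foldl aStep ([b], [[a]]) := by
        simp [aStep, hab, List.getLast!]
      rw [h1, lemA l' [b] [[a]], hfold]
      cases r0 with
      | nil =>
        simp only [List.headD] at hu
        simp [altStep, hu, show ¬ b = a + 1 by omega]
      | cons g gs =>
        simp only [List.headD] at hu
        simp [altStep, hu, show ¬ b = a + 1 by omega]

-- ===== VERDICT (by name: the statement is the Claim_ definition above) =====
theorem subSequenceList_spec : Claim_equal_subSequenceList := by
  intro arr _ hpre
  unfold Spec_subSequenceList
  cases arr with
  | nil => exact absurd rfl hpre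
  | cons a l => exact main_eq l a
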